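-- pv_equiv track=rewrite | github.com/theasguard/Repo | plugin.video.asguard/scrapers/noxx.py | _is_ddos_guard_challenge
-- ===== SOURCE A (Python) =====
-- def _is_ddos_guard_challenge(html):
--     """
--     Check if response contains DDoS-Guard challenge
--     """
--     if not html:
--         return False
--
--     ddos_guard_indicators = [
--         'ddos-guard',
--         'DDoS-Guard',
--         '__ddg8_',
--         'check.ddos-guard.net',
--         'js-challenge'
--     ]
--
--     return any(indicator in html for indicator in ddos_guard_indicators)
-- ===== SOURCE B (Python) =====
-- def _is_ddos_guard_challenge(html):
--     """
--     Check if response contains DDoS-Guard challenge.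
--     Single left-to-right scan with first-character dispatch: each indicator
--     starts with a distinct character (d, D, _, c, j), so at each position at
--     most one indicator needs to be tested.
--     """
--     if not html:
--         return False
--     for i in range(len(html)):
--         c = html[i]
--         if c == 'd':
--             if html.startswith('dos-guard', i + 1):
--                 return True
--         elif c == 'D':
--             if html.startswith('DoS-Guard', i + 1):
--                 return True
--         elif c == '_':
--             if html.startswith('_ddg8_', i + 1):
--                 return True
--         elif c == 'c':
--             if html.startswith('heck.ddos-guard.net', i + 1):
--                 return True
--         elif c == 'j':
--             if html.startswith('s-challenge', i + 1):
--                 return True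
--     return False
-- ===== Notes on version B (the rewrite author's own statement) =====
-- stated objective: alternative
-- what changed: Replaces five independent full substring scans ('in' per indicator) with a single left-to-right scan that dispatches on the first character (each indicator begins with a distinct character) and tests at most one indicator per position.
import Mathlib
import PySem

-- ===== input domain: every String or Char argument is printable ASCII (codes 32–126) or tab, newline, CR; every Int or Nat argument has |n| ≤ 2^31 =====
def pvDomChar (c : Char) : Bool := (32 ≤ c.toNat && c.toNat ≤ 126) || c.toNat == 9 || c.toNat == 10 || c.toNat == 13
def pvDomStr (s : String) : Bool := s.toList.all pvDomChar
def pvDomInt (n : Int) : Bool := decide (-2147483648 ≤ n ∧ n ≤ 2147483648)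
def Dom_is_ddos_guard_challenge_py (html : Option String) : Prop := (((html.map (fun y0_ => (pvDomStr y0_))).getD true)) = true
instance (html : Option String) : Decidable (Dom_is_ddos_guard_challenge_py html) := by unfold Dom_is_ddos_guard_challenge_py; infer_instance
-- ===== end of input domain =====

-- B replaces A's five independent full substring scans with a single left-to-right
-- scan that dispatches on the first character of each indicator (objective: alternative).

-- ===== PORT A =====
-- the five indicator literals of A's list
def ddosIndicators : List String :=
  ["ddos-guard", "DDoS-Guard", "__ddg8_", "check.ddos-guard.net", "js-challenge"]

def is_ddos_guard_challenge_py (html : Option String) : Bool :=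
  match html with
  | none => false
  | some s =>
    if s.toList = [] then false
    else ddosIndicators.any (fun ind => PySem.Str.isIn ind s)

-- ===== PORT B =====
-- html.startswith(tail, i+1), expressed on the suffix after the dispatched character
def pvPref : List Char → List Char → Bool
  | [], _ => true
  | _ :: _, [] => false
  | a :: as, b :: bs => a == b && pvPref as bs

-- the loop 'for i in range(len(html)): dispatch on html[i]', as structural recursion
def pvScan : List Char → Bool
  | [] => false
  | c :: rest =>
    if c = 'd' then pvPref "dos-guard".toList rest || pvScan rest
    else if c = 'D' then pvPref "DoS-Guard".toList rest || pvScan rest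
    else if c = '_' then pvPref "_ddg8_".toList rest || pvScan rest
    else if c = 'c' then pvPref "heck.ddos-guard.net".toList rest || pvScan rest
    else if c = 'j' then pvPref "s-challenge".toList rest || pvScan rest
    else pvScan rest

def is_ddos_guard_challenge_py_alt (html : Option String) : Bool :=
  match html with
  | none => false
  | some s =>
    match s.toList with
    | [] => false
    | cs => pvScan cs

-- ===== PRECONDITION & SPEC =====
def Spec_is_ddos_guard_challenge_py (html : Option String) (out : Bool) : Prop := out = is_ddos_guard_challenge_py_alt html
instance (html : Option String) (out : Bool) : Decidable (Spec_is_ddos_guard_challenge_py html out) := by unfold Spec_is_ddos_guard_challenge_py; infer_instance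

-- ===== CLAIM (what is proved, stated in full; the proofs are below) =====
def Claim_equal_is_ddos_guard_challenge_py : Prop := ∀ (html : Option String), Dom_is_ddos_guard_challenge_py html → Spec_is_ddos_guard_challenge_py html (is_ddos_guard_challenge_py html)

-- ===== LEMMAS AND PROOFS =====

theorem pvPref_eq (as bs : List Char) : pvPref as bs = as.isPrefixOf bs := by
  induction as generalizing bs with
  | nil => simp [pvPref]
  | cons a as ih =>
    cases bs with
    | nil => simp [pvPref]
    | cons b bs => simp [pvPref, List.isPrefixOf, ih]

theorem isIn_cons (sub : List Char) (c : Char) (rest : List Char) :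
    PySem.Chars.isIn sub (c :: rest)
      = (sub.isPrefixOf (c :: rest) || PySem.Chars.isIn sub rest) := by
  rw [Bool.eq_iff_iff]
  simp [PySem.Chars.isIn_iff_infix, List.isPrefixOf_iff_prefix, List.infix_cons_iff]

theorem pvScan_eq_any_isIn (cs : List Char) :
    pvScan cs = ddosIndicators.any (fun ind => PySem.Chars.isIn ind.toList cs) := by
  induction cs with
  | nil => decide
  | cons c rest ih =>
    simp only [ddosIndicators, List.any_cons, List.any_nil, isIn_cons, Bool.or_false] at ih ⊢
    by_cases h1 : c = 'd'
    · subst h1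
      simp [pvScan, pvPref_eq, ih, List.isPrefixOf]
      rw [Bool.eq_iff_iff]; simp; tauto
    · by_cases h2 : c = 'D'
      · subst h2
        simp [pvScan, pvPref_eq, ih, List.isPrefixOf]
        rw [Bool.eq_iff_iff]; simp; tauto
      · by_cases h3 : c = '_'
        · subst h3
          simp [pvScan, pvPref_eq, ih, List.isPrefixOf]
          rw [Bool.eq_iff_iff]; simp; tauto
        · by_cases h4 : c = 'c'
          · subst h4
            simp [pvScan, pvPref_eq, ih, List.isPrefixOf]
            rw [Bool.eq_iff_iff]; simp; tauto
          · by_cases h5 : c = 'j'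
            · subst h5
              simp [pvScan, pvPref_eq, ih, List.isPrefixOf]
              rw [Bool.eq_iff_iff]; simp; tauto
            · have e1 : ('d' == c) = false := by simp [Ne.symm h1]
              have e2 : ('D' == c) = false := by simp [Ne.symm h2]
              have e3 : ('_' == c) = false := by simp [Ne.symm h3]
              have e4 : ('c' == c) = false := by simp [Ne.symm h4]
              have e5 : ('j' == c) = false := by simp [Ne.symm h5]
              simp [pvScan, h1, h2, h3, h4, h5, ih, List.isPrefixOf, e1, e2, e3, e4, e5]

-- ===== VERDICT (by name: the statement is the Claim_ definition above) =====
theorem is_ddos_guard_challenge_py_spec : Claim_equal_is_ddos_guard_challenge_py := by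
  intro html _
  unfold Spec_is_ddos_guard_challenge_py
  match html with
  | none => rfl
  | some s =>
    simp only [is_ddos_guard_challenge_py, is_ddos_guard_challenge_py_alt]
    cases hcs : s.toList with
    | nil => simp
    | cons c rest =>
      simp only [reduceCtorEq, if_false]
      rw [pvScan_eq_any_isIn]
      simp [PySem.Str.isIn_eq, hcs]
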